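-- pv_equiv track=rewrite | github.com/raghu-vijaykumar/recall | backend/app/services/workspace_analysis_service.py | _find_line_for_position
-- ===== SOURCE A (Python) =====
-- from typing import List, Dict, Any, Optional, Set, Tuple
--
-- def _find_line_for_position(lines: List[str], char_position: int) -> int:
--     """
--     Find which line number contains a specific character position
--     """
--     current_pos = 0
--     for line_num, line in enumerate(lines):
--         line_length = len(line) + 1  # +1 for newline
--         if current_pos <= char_position < current_pos + line_length:
--             return line_num
--         current_pos += line_length
--     return 0
-- ===== SOURCE B (Python) =====
-- def _find_line_for_position(lines, char_position):
--     # Prefix-sum offset table + hand-rolled bisect_right (binary search);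
--     # 0 fallback for negative, past-the-end, or empty input, matching A.
--     offsets = [0]
--     total = 0
--     for line in lines:
--         total += len(line) + 1
--         offsets.append(total)
--     if char_position < 0 or not lines or char_position >= total:
--         return 0
--     lo, hi = 0, len(offsets)
--     while lo < hi:
--         mid = (lo + hi) // 2
--         if offsets[mid] <= char_position:
--             lo = mid + 1
--         else:
--             hi = mid
--     return lo - 1
-- ===== Notes on version B (the rewrite author's own statement) =====
-- stated objective: alternative
-- what changed: Replaces A's running-position linear scan with a prefix-sum offset table queried by a hand-written bisect_right binary search, with an explicit 0 fallback for negative, past-the-end, or empty input.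
import Mathlib
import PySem

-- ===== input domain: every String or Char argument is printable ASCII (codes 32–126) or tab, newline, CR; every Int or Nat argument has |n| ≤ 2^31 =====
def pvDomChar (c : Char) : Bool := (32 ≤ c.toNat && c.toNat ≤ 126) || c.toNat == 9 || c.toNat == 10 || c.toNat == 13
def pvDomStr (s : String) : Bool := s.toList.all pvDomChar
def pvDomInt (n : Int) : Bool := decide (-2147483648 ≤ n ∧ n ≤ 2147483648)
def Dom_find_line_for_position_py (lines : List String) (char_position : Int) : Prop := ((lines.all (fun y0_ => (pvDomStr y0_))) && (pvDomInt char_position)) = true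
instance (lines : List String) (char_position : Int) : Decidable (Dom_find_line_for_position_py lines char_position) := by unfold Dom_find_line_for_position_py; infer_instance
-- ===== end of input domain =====

-- B replaces A's running-position linear scan by a prefix-sum offset table plus a
-- hand-written binary search (bisect_right) over it; same results on every input.

-- ===== PORT A =====
-- the for-loop of A: state = (current_pos, line_num); returns on the first hit, else 0
def pvFindA (cp : Int) : List String → Int → Int → Int
  | [], _, _ => 0
  | line :: rest, pos, i =>
    if pos ≤ cp ∧ cp < pos + (PySem.Str.len line + 1) then i
    else pvFindA cp rest (pos + (PySem.Str.len line + 1)) (i + 1)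

def find_line_for_position_py (lines : List String) (char_position : Int) : Int :=
  pvFindA char_position lines 0 0

-- ===== PORT B =====
-- B's first loop: appends total to offsets for each line
def pvOffLoop : List String → Int → List Int → List Int × Int
  | [], total, offsets => (offsets, total)
  | l :: ls, total, offsets =>
    pvOffLoop ls (total + (PySem.Str.len l + 1)) (offsets ++ [total + (PySem.Str.len l + 1)])

-- B's while-loop (hand-written bisect_right); the index (lo+hi)//2 is always in range,
-- so List.getD is exact for Python's offsets[mid]
def pvBisect (offsets : List Int) (cp : Int) (lo hi : Nat) : Nat :=
  if h : lo < hi then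
    if offsets.getD ((lo + hi) / 2) 0 ≤ cp then pvBisect offsets cp ((lo + hi) / 2 + 1) hi
    else pvBisect offsets cp lo ((lo + hi) / 2)
  else lo
termination_by hi - lo
decreasing_by all_goals omega

def find_line_for_position_py_alt (lines : List String) (char_position : Int) : Int :=
  match pvOffLoop lines 0 [0] with
  | (offsets, total) =>
    if char_position < 0 ∨ lines = [] ∨ total ≤ char_position then 0
    else (pvBisect offsets char_position 0 offsets.length : Int) - 1

-- ===== PRECONDITION & SPEC =====
def Spec_find_line_for_position_py (lines : List String) (char_position : Int) (out : Int) : Prop := out = find_line_for_position_py_alt lines char_position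
instance (lines : List String) (char_position : Int) (out : Int) : Decidable (Spec_find_line_for_position_py lines char_position out) := by unfold Spec_find_line_for_position_py; infer_instance

-- ===== CLAIM (what is proved, stated in full; the proofs are below) =====
def Claim_equal_find_line_for_position_py : Prop := ∀ (lines : List String) (char_position : Int), Dom_find_line_for_position_py lines char_position → Spec_find_line_for_position_py lines char_position (find_line_for_position_py lines char_position)

-- ===== LEMMAS AND PROOFS =====

-- sum of len(line)+1 over the first k lines
def pvPsum : List String → Nat → Int
  | _, 0 => 0
  | [], _+1 => 0
  | l :: ls, k+1 => (PySem.Str.len l + 1) + pvPsum ls k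

-- the offsets appended by B's first loop, starting from running total t
def pvOffList : List String → Int → List Int
  | [], _ => []
  | l :: ls, t => (t + (PySem.Str.len l + 1)) :: pvOffList ls (t + (PySem.Str.len l + 1))

lemma pvStrLen_nonneg (s : String) : 0 ≤ PySem.Str.len s := by
  simp [PySem.Str.len_eq]

lemma pvPsum_nonneg (ls : List String) (k : Nat) : 0 ≤ pvPsum ls k := by
  induction ls generalizing k with
  | nil => cases k <;> simp [pvPsum]
  | cons l ls ih =>
    cases k with
    | zero => simp [pvPsum]
    | succ k => simp only [pvPsum]; have := pvStrLen_nonneg l; have := ih k; omega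

lemma pvPsum_le_succ (ls : List String) (k : Nat) : pvPsum ls k ≤ pvPsum ls (k+1) := by
  induction ls generalizing k with
  | nil => cases k <;> simp [pvPsum]
  | cons l ls ih =>
    cases k with
    | zero => simp only [pvPsum]; have := pvStrLen_nonneg l; have := pvPsum_nonneg ls 0; omega
    | succ k => simp only [pvPsum]; have := ih k; omega

lemma pvPsum_mono (ls : List String) {k k' : Nat} (h : k ≤ k') : pvPsum ls k ≤ pvPsum ls k' := by
  induction k' with
  | zero => interval_cases k; rfl
  | succ k' ih =>
    rcases Nat.lt_or_ge k (k'+1) with h1 | h1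
    · exact le_trans (ih (by omega)) (pvPsum_le_succ ls k')
    · have : k = k' + 1 := by omega
      simp [this]

lemma pvOffLoop_eq (ls : List String) : ∀ (t : Int) (acc : List Int),
    pvOffLoop ls t acc = (acc ++ pvOffList ls t, t + pvPsum ls ls.length) := by
  induction ls with
  | nil => intro t acc; simp [pvOffLoop, pvOffList, pvPsum]
  | cons l ls ih =>
    intro t acc
    simp only [pvOffLoop, pvOffList, ih, List.append_assoc, List.singleton_append,
      List.length_cons, pvPsum]
    rw [add_assoc]

lemma pvOffList_length (ls : List String) (t : Int) : (pvOffList ls t).length = ls.length := by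
  induction ls generalizing t with
  | nil => simp [pvOffList]
  | cons l ls ih => simp [pvOffList, ih]

lemma pvOffList_getD (ls : List String) : ∀ (t : Int) (k : Nat), k < ls.length →
    (pvOffList ls t).getD k 0 = t + pvPsum ls (k+1) := by
  induction ls with
  | nil => intro t k h; simp at h
  | cons l ls ih =>
    intro t k h
    cases k with
    | zero => simp [pvOffList, pvPsum]
    | succ k =>
      simp only [pvOffList, List.getD_cons_succ, pvPsum]
      rw [ih _ k (by simpa using h)]
      ring

lemma pvOffsets_getD (ls : List String) (k : Nat) (h : k ≤ ls.length) :
    (0 :: pvOffList ls 0).getD k 0 = pvPsum ls k := by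
  cases k with
  | zero => simp [pvPsum]
  | succ k =>
    simp only [List.getD_cons_succ]
    rw [pvOffList_getD ls 0 k (by omega)]
    ring

lemma pvBisect_correct (off : List Int) (cp : Int)
    (hsort : ∀ i j : Nat, i ≤ j → j < off.length → off.getD i 0 ≤ off.getD j 0) :
    ∀ (fuel lo hi : Nat), hi - lo ≤ fuel → lo ≤ hi → hi ≤ off.length →
    (∀ i, i < lo → off.getD i 0 ≤ cp) →
    (∀ i, hi ≤ i → i < off.length → cp < off.getD i 0) →
    (∀ i, i < pvBisect off cp lo hi → off.getD i 0 ≤ cp) ∧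
    (∀ i, pvBisect off cp lo hi ≤ i → i < off.length → cp < off.getD i 0) ∧
    lo ≤ pvBisect off cp lo hi ∧ pvBisect off cp lo hi ≤ hi := by
  intro fuel
  induction fuel with
  | zero =>
    intro lo hi hf hlh hhl hlow hhigh
    have : lo = hi := by omega
    subst this
    rw [pvBisect]; simp only [lt_irrefl, dite_false]
    exact ⟨hlow, fun i h1 h2 => hhigh i h1 h2, le_refl _, le_refl _⟩
  | succ fuel ih =>
    intro lo hi hf hlh hhl hlow hhigh
    rw [pvBisect]
    by_cases h : lo < hi
    · simp only [h, dite_true]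
      have hmid1 : lo ≤ (lo + hi) / 2 := by omega
      have hmid2 : (lo + hi) / 2 < hi := by omega
      by_cases hc : off.getD ((lo + hi) / 2) 0 ≤ cp
      · simp only [hc, if_true]
        have hlow' : ∀ i, i < (lo + hi) / 2 + 1 → off.getD i 0 ≤ cp := by
          intro i hi'
          exact le_trans (hsort i ((lo + hi) / 2) (by omega) (by omega)) hc
        have := ih ((lo + hi) / 2 + 1) hi (by omega) (by omega) hhl hlow' hhigh
        exact ⟨this.1, this.2.1, by omega, this.2.2.2⟩
      · simp only [hc, if_false]
        push Not at hc
        have hhigh' : ∀ i, (lo + hi) / 2 ≤ i → i < off.length → cp < off.getD i 0 := by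
          intro i h1 h2
          exact lt_of_lt_of_le hc (hsort ((lo + hi) / 2) i h1 h2)
        have := ih lo ((lo + hi) / 2) (by omega) (by omega) (by omega) hlow hhigh'
        exact ⟨this.1, this.2.1, this.2.2.1, by omega⟩
    · simp only [h, dite_false]
      have : lo = hi := by omega
      subst this
      exact ⟨hlow, fun i h1 h2 => hhigh i h1 h2, le_refl _, le_refl _⟩

-- A returns 0 when cp lies left of pos or at/after pos + total length
lemma pvFindA_zero (cp : Int) : ∀ (ls : List String) (pos i : Int),
    (cp < pos ∨ pos + pvPsum ls ls.length ≤ cp) → pvFindA cp ls pos i = 0 := by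
  intro ls
  induction ls with
  | nil => intro pos i _; simp [pvFindA]
  | cons l ls ih =>
    intro pos i h
    have hl := pvStrLen_nonneg l
    have hp0 : 0 ≤ pvPsum ls ls.length := pvPsum_nonneg ls ls.length
    simp only [pvFindA]
    rw [if_neg, ih]
    · rcases h with h | h
      · left; omega
      · right; simp only [List.length_cons, pvPsum] at h; omega
    · rcases h with h | h
      · rintro ⟨h1, -⟩; omega
      · rintro ⟨-, h2⟩; simp only [List.length_cons, pvPsum] at h; omega

-- A in the hit case: the returned line index k brackets cp between partial sums
lemma pvFindA_found (cp : Int) : ∀ (ls : List String) (pos i : Int),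
    pos ≤ cp → cp < pos + pvPsum ls ls.length →
    ∃ k : Nat, k < ls.length ∧ pos + pvPsum ls k ≤ cp ∧ cp < pos + pvPsum ls (k+1) ∧
      pvFindA cp ls pos i = i + (k : Int) := by
  intro ls
  induction ls with
  | nil => intro pos i h1 h2; simp [pvPsum] at h2; omega
  | cons l ls ih =>
    intro pos i h1 h2
    simp only [pvFindA]
    by_cases hc : cp < pos + (PySem.Str.len l + 1)
    · refine ⟨0, by simp, ?_, ?_, ?_⟩
      · simp [pvPsum]; omega
      · simp only [pvPsum]; omega
      · rw [if_pos ⟨h1, hc⟩]; simp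
    · push Not at hc
      rw [if_neg (by rintro ⟨-, h⟩; omega)]
      have h2' : cp < pos + (PySem.Str.len l + 1) + pvPsum ls ls.length := by
        simp only [List.length_cons, pvPsum] at h2; omega
      obtain ⟨k, hk1, hk2, hk3, hk4⟩ := ih (pos + (PySem.Str.len l + 1)) (i + 1) hc h2'
      refine ⟨k + 1, by simpa using hk1, ?_, ?_, ?_⟩
      · simp only [pvPsum]; omega
      · simp only [pvPsum]; omega
      · rw [hk4]; push_cast; ring

-- ===== VERDICT (by name: the statement is the Claim_ definition above) =====
theorem find_line_for_position_py_spec : Claim_equal_find_line_for_position_py := by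
  intro lines cp _dom
  unfold Spec_find_line_for_position_py
  unfold find_line_for_position_py find_line_for_position_py_alt
  rw [pvOffLoop_eq]
  dsimp only [List.singleton_append]
  set n := lines.length with hn
  by_cases hz : cp < 0 ∨ lines = [] ∨ 0 + pvPsum lines n ≤ cp
  · rw [if_pos hz]
    rcases hz with h | h | h
    · exact pvFindA_zero cp lines 0 0 (Or.inl (by omega))
    · subst h; simp [pvFindA]
    · exact pvFindA_zero cp lines 0 0 (Or.inr (by omega))
  · rw [if_neg hz]
    push Not at hz
    obtain ⟨hcp0, hne, hcptot⟩ := hz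
    -- A side
    obtain ⟨k, hk1, hk2, hk3, hk4⟩ :=
      pvFindA_found cp lines 0 0 (by omega) (by omega)
    -- B side
    have hlen : ((0 :: pvOffList lines 0)).length = n + 1 := by
      simp [pvOffList_length, hn]
    have hsort : ∀ i j : Nat, i ≤ j → j < ((0 :: pvOffList lines 0)).length →
        ((0 :: pvOffList lines 0)).getD i 0 ≤ ((0 :: pvOffList lines 0)).getD j 0 := by
      intro i j hij hjl
      rw [hlen] at hjl
      rw [pvOffsets_getD lines i (by omega), pvOffsets_getD lines j (by omega)]
      exact pvPsum_mono lines hij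
    obtain ⟨hb1, hb2, hb3, hb4⟩ :=
      pvBisect_correct ((0 :: pvOffList lines 0)) cp hsort
        (((0 :: pvOffList lines 0)).length) 0 (((0 :: pvOffList lines 0)).length)
        (by omega) (by omega) (by omega)
        (by omega) (by intro i h1 h2; omega)
    set r := pvBisect ((0 :: pvOffList lines 0)) cp 0 (((0 :: pvOffList lines 0)).length) with hr
    rw [hlen] at hb4
    -- r = k + 1
    have hoffk : ((0 :: pvOffList lines 0)).getD k 0 = pvPsum lines k := by
      exact pvOffsets_getD lines k (by omega)
    have hoffk1 : ((0 :: pvOffList lines 0)).getD (k+1) 0 = pvPsum lines (k+1) := by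
      exact pvOffsets_getD lines (k+1) (by omega)
    have hkr : k < r := by
      by_contra hcon
      have := hb2 k (by omega) (by omega)
      rw [hoffk] at this
      omega
    have hrk : r ≤ k + 1 := by
      by_contra hcon
      have := hb1 (k+1) (by omega)
      rw [hoffk1] at this
      omega
    have : r = k + 1 := by omega
    rw [hk4, this]
    push_cast
    ring
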